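-- pv_equiv track=rewrite | github.com/czbnlp/ILEX-SQL | enhanced_sql_generator_lpe.py | _build_examples_prompt
-- ===== SOURCE A (Python) =====
-- from typing import Dict, List, Tuple, Any, Optional
--
-- def _build_examples_prompt(correct_examples: List[Dict], mistake_examples: List[Dict]) -> str:
--     """构建示例提示词部分"""
--     prompt_parts = []
--
--     # 添加正确示例
--     if correct_examples:
--         correct_prompt_parts = []
--         for index, example in enumerate(correct_examples):
--             example_text = f"example{index+1}: {{\n"
--             example_text += f"## Question: {example.get('question', '')}\n"
--             example_text += f"## SQL: {example.get('sql', '')}\n"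
--             if example.get('hint'):
--                 example_text += f"## Hint: {example['hint']}\n"
--             if example.get('thought process'):
--                 example_text += f"## Thought process: {example['thought process']}\n"
--             example_text += "\n}"
--             correct_prompt_parts.append(example_text)
--
--         correct_section = "### For your reference, here are some examples of Questions, SQL queries, and thought processes related to the Question you're working with\n\n"
--         correct_section += "\n\n".join(correct_prompt_parts)
--         prompt_parts.append(correct_section)
--
--     # 添加错误示例
--     if mistake_examples:
--         mistake_prompt_parts = []
--         for index, example in enumerate(mistake_examples):
--             example_text = f"example{index+1}: {{\n"
--             example_text += f"## Question: {example.get('question', '')}\n"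
--             example_text += f"## Error SQL: {example.get('error_sql', '')}\n"
--             if example.get('compiler_hint'):
--                 example_text += f"## Compiler hint: {example['compiler_hint']}\n"
--             if example.get('reflective_cot'):
--                 example_text += f"## Reflection: {example['reflective_cot']}\n"
--             if example.get('ground_truth_sql'):
--                 example_text += f"## Correct SQL: {example['ground_truth_sql']}\n"
--             example_text += "\n}"
--             mistake_prompt_parts.append(example_text)
--
--         mistake_section = "### Below are examples of mistakes you've made before that are similar to the question you're about to tackle, so please refer to not making the same mistake!\n\n"
--         mistake_section += "\n\n".join(mistake_prompt_parts)
--         prompt_parts.append(mistake_section)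
--
--     return "\n\n".join(prompt_parts)
-- ===== SOURCE B (Python) =====
-- def _build_examples_prompt(correct_examples, mistake_examples):
--     """Table-driven rebuild: sections described as (header, field-spec list)."""
--     def render(header, fields, examples):
--         if not examples:
--             return None
--         parts = []
--         for i, ex in enumerate(examples):
--             lines = "".join(
--                 f"## {label}: {ex.get(key, '')}\n" if always
--                 else (f"## {label}: {ex[key]}\n" if ex.get(key) else "")
--                 for label, key, always in fields
--             )
--             parts.append(f"example{i+1}: {{\n" + lines + "\n}")
--         return header + "\n\n".join(parts)
--
--     sections = [
--         render(
--             "### For your reference, here are some examples of Questions, SQL queries, and thought processes related to the Question you're working with\n\n",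
--             [("Question", "question", True), ("SQL", "sql", True),
--              ("Hint", "hint", False), ("Thought process", "thought process", False)],
--             correct_examples),
--         render(
--             "### Below are examples of mistakes you've made before that are similar to the question you're about to tackle, so please refer to not making the same mistake!\n\n",
--             [("Question", "question", True), ("Error SQL", "error_sql", True),
--              ("Compiler hint", "compiler_hint", False), ("Reflection", "reflective_cot", False),
--              ("Correct SQL", "ground_truth_sql", False)],
--             mistake_examples),
--     ]
--     return "\n\n".join(s for s in sections if s is not None)
-- ===== Notes on version B (the rewrite author's own statement) =====
-- stated objective: simpler
-- what changed: Replaced the two hand-unrolled per-field blocks with one table-driven helper that renders any section from a (header, field-spec) description, where each field spec says whether the field is unconditional-with-default or truthy-gated.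
import Mathlib
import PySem

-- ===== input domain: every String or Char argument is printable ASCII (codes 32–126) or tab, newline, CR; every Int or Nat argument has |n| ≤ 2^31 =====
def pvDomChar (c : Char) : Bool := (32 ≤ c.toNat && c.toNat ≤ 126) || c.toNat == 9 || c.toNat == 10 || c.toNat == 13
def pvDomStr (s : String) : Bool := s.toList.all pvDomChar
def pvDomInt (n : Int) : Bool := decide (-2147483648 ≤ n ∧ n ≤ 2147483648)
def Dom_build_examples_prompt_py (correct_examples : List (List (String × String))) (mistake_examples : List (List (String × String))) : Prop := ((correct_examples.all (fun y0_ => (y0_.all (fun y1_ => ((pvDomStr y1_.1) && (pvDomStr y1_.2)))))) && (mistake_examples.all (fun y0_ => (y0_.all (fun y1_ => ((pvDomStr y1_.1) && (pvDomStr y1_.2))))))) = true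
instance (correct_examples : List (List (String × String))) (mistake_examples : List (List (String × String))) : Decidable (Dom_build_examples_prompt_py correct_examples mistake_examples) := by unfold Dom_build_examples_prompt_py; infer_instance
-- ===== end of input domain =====

-- B replaces the two hand-unrolled per-field blocks with one table-driven section renderer (objective: simpler).

-- ===== PORT A =====
-- dict.get(k, '') on an association list: first match, default "".
-- 'if example.get(k):' is exact as 'dget ex k ≠ ""': get() is falsy exactly on None or "",
-- and when truthy example[k] equals that same first-match value.
def pvDget (ex : List (String × String)) (k : String) : String :=
  ((ex.find? (fun p => p.1 == k)).map (·.2)).getD ""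

def pvACorrect (p : Int × List (String × String)) : String :=
  let t := "example" ++ PySem.Int.toStr (p.1 + 1) ++ ": {\n"
  let t := t ++ "## Question: " ++ pvDget p.2 "question" ++ "\n"
  let t := t ++ "## SQL: " ++ pvDget p.2 "sql" ++ "\n"
  let t := if pvDget p.2 "hint" ≠ "" then t ++ "## Hint: " ++ pvDget p.2 "hint" ++ "\n" else t
  let t := if pvDget p.2 "thought process" ≠ "" then t ++ "## Thought process: " ++ pvDget p.2 "thought process" ++ "\n" else t
  t ++ "\n}"

def pvAMistake (p : Int × List (String × String)) : String :=
  let t := "example" ++ PySem.Int.toStr (p.1 + 1) ++ ": {\n"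
  let t := t ++ "## Question: " ++ pvDget p.2 "question" ++ "\n"
  let t := t ++ "## Error SQL: " ++ pvDget p.2 "error_sql" ++ "\n"
  let t := if pvDget p.2 "compiler_hint" ≠ "" then t ++ "## Compiler hint: " ++ pvDget p.2 "compiler_hint" ++ "\n" else t
  let t := if pvDget p.2 "reflective_cot" ≠ "" then t ++ "## Reflection: " ++ pvDget p.2 "reflective_cot" ++ "\n" else t
  let t := if pvDget p.2 "ground_truth_sql" ≠ "" then t ++ "## Correct SQL: " ++ pvDget p.2 "ground_truth_sql" ++ "\n" else t
  t ++ "\n}"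

def build_examples_prompt_py (correct_examples : List (List (String × String))) (mistake_examples : List (List (String × String))) : String :=
  let prompt_parts : List String := []
  let prompt_parts :=
    if correct_examples ≠ [] then
      let correct_prompt_parts := (PySem.List.enumerate correct_examples).foldl
        (fun acc p => acc ++ [pvACorrect p]) []
      let correct_section := "### For your reference, here are some examples of Questions, SQL queries, and thought processes related to the Question you're working with\n\n"
      let correct_section := correct_section ++ PySem.Str.join "\n\n" correct_prompt_parts
      prompt_parts ++ [correct_section]
    else prompt_parts
  let prompt_parts :=
    if mistake_examples ≠ [] then
      let mistake_prompt_parts := (PySem.List.enumerate mistake_examples).foldl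
        (fun acc p => acc ++ [pvAMistake p]) []
      let mistake_section := "### Below are examples of mistakes you've made before that are similar to the question you're about to tackle, so please refer to not making the same mistake!\n\n"
      let mistake_section := mistake_section ++ PySem.Str.join "\n\n" mistake_prompt_parts
      prompt_parts ++ [mistake_section]
    else prompt_parts
  PySem.Str.join "\n\n" prompt_parts

-- ===== PORT B =====
-- field spec: (label, key, always?) — always? true: unconditional with '' default; false: truthy-gated
def pvBFieldsCorrect : List (String × String × Bool) :=
  [("Question", "question", true), ("SQL", "sql", true),
   ("Hint", "hint", false), ("Thought process", "thought process", false)]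

def pvBFieldsMistake : List (String × String × Bool) :=
  [("Question", "question", true), ("Error SQL", "error_sql", true),
   ("Compiler hint", "compiler_hint", false), ("Reflection", "reflective_cot", false),
   ("Correct SQL", "ground_truth_sql", false)]

def pvBLine (ex : List (String × String)) (f : String × String × Bool) : String :=
  if f.2.2 then "## " ++ f.1 ++ ": " ++ pvDget ex f.2.1 ++ "\n"
  else if pvDget ex f.2.1 ≠ "" then "## " ++ f.1 ++ ": " ++ pvDget ex f.2.1 ++ "\n" else ""

-- "".join over the field lines, as a fold of appends
def pvBExample (fields : List (String × String × Bool)) (p : Int × List (String × String)) : String :=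
  "example" ++ PySem.Int.toStr (p.1 + 1) ++ ": {\n"
    ++ fields.foldl (fun acc f => acc ++ pvBLine p.2 f) "" ++ "\n}"

def pvBSection (header : String) (fields : List (String × String × Bool))
    (examples : List (List (String × String))) : Option String :=
  if examples = [] then none
  else some (header ++ PySem.Str.join "\n\n" ((PySem.List.enumerate examples).map (pvBExample fields)))

def build_examples_prompt_py_alt (correct_examples : List (List (String × String))) (mistake_examples : List (List (String × String))) : String :=
  PySem.Str.join "\n\n"
    ([pvBSection "### For your reference, here are some examples of Questions, SQL queries, and thought processes related to the Question you're working with\n\n" pvBFieldsCorrect correct_examples,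
      pvBSection "### Below are examples of mistakes you've made before that are similar to the question you're about to tackle, so please refer to not making the same mistake!\n\n" pvBFieldsMistake mistake_examples].filterMap id)

-- ===== PRECONDITION & SPEC =====
def Spec_build_examples_prompt_py (correct_examples : List (List (String × String))) (mistake_examples : List (List (String × String))) (out : String) : Prop := out = build_examples_prompt_py_alt correct_examples mistake_examples
instance (correct_examples : List (List (String × String))) (mistake_examples : List (List (String × String))) (out : String) : Decidable (Spec_build_examples_prompt_py correct_examples mistake_examples out) := by unfold Spec_build_examples_prompt_py; infer_instance

-- ===== CLAIM (what is proved, stated in full; the proofs are below) =====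
def Claim_equal_build_examples_prompt_py : Prop := ∀ (correct_examples : List (List (String × String))) (mistake_examples : List (List (String × String))), Dom_build_examples_prompt_py correct_examples mistake_examples → Spec_build_examples_prompt_py correct_examples mistake_examples (build_examples_prompt_py correct_examples mistake_examples)

-- ===== LEMMAS AND PROOFS =====

theorem pvEx_correct (p : Int × List (String × String)) :
    pvACorrect p = pvBExample pvBFieldsCorrect p := by
  simp only [pvACorrect, pvBExample, pvBFieldsCorrect, pvBLine, List.foldl]
  split_ifs
  all_goals apply String.toList_injective
  all_goals simp_all [String.toList_append]

theorem pvEx_mistake (p : Int × List (String × String)) :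
    pvAMistake p = pvBExample pvBFieldsMistake p := by
  simp only [pvAMistake, pvBExample, pvBFieldsMistake, pvBLine, List.foldl]
  split_ifs
  all_goals apply String.toList_injective
  all_goals simp_all [String.toList_append]

theorem pvFold_map {α : Type} (f : α → String) (l : List α) (acc : List String) :
    l.foldl (fun a x => a ++ [f x]) acc = acc ++ l.map f := by
  induction l generalizing acc with
  | nil => simp
  | cons x xs ih => simp [List.foldl, ih]

-- ===== VERDICT (by name: the statement is the Claim_ definition above) =====
theorem build_examples_prompt_py_spec : Claim_equal_build_examples_prompt_py := by
  intro c m _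
  show build_examples_prompt_py c m = build_examples_prompt_py_alt c m
  unfold build_examples_prompt_py build_examples_prompt_py_alt pvBSection
  rw [pvFold_map pvACorrect, pvFold_map pvAMistake]
  simp only [List.nil_append]
  have hc : (PySem.List.enumerate c).map pvACorrect = (PySem.List.enumerate c).map (pvBExample pvBFieldsCorrect) :=
    List.map_congr_left (fun p _ => pvEx_correct p)
  have hm : (PySem.List.enumerate m).map pvAMistake = (PySem.List.enumerate m).map (pvBExample pvBFieldsMistake) :=
    List.map_congr_left (fun p _ => pvEx_mistake p)
  rw [hc, hm]
  rcases eq_or_ne c [] with rfl | hcne <;> rcases eq_or_ne m [] with rfl | hmne <;>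
    simp [List.filterMap, *]
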